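-- pv_equiv track=rewrite | github.com/cindyellow/temporal-multimodal-learning | data/custom_dataset.py | _get_note_end_chunk_ids
-- ===== SOURCE A (Python) =====
-- def _get_note_end_chunk_ids(seq_ids):
--     id = seq_ids[0]
--     change_points = []
--     for i, seq_id in enumerate(seq_ids):
--         if seq_id != id:
--             change_points.append(i - 1)
--             id = seq_id
--     # append last index, as it is always the indication of the last note
--     change_points.append(i)
--     return change_points
-- ===== SOURCE B (Python) =====
-- def _get_note_end_chunk_ids(seq_ids):
--     # Run-skipping two-pointer scan: for each contiguous run of equal ids,
--     # jump to its end and record that index. Returns [] on empty input.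
--     out = []
--     i, n = 0, len(seq_ids)
--     while i < n:
--         j = i + 1
--         while j < n and seq_ids[j] == seq_ids[i]:
--             j += 1
--         out.append(j - 1)
--         i = j
--     return out
-- ===== Notes on version B (the rewrite author's own statement) =====
-- stated objective: alternative
-- what changed: Replaces the enumerate loop that compares each element to a tracked previous id (emitting i-1 at change points plus a final unconditional append) by a two-pointer scan that jumps from run start to run end and records each run's last index directly.
import Mathlib
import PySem

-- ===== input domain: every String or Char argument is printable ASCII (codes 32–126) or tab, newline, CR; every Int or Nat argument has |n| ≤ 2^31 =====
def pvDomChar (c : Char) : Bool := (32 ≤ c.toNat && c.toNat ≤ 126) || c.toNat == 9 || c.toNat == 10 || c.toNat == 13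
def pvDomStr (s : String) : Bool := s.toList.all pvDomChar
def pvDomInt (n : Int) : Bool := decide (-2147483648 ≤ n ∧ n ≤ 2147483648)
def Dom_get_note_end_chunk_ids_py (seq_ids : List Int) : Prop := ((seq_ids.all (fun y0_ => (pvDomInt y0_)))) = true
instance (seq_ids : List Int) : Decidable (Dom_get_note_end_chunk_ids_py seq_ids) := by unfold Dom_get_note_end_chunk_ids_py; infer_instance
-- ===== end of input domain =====

-- B replaces A's change-point detection (enumerate + tracked previous id + final append)
-- by a two-pointer run-skipping scan emitting each run's last index; same cost, different algorithm.


-- ===== PORT A =====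
-- loop body: state (id, change_points, i); i is the last-seen enumerate index
def pvStepA (st : Int × List Int × Int) (p : Int × Int) : Int × List Int × Int :=
  if p.2 ≠ st.1 then (p.2, st.2.1 ++ [p.1 - 1], p.1) else (st.1, st.2.1, p.1)

def get_note_end_chunk_ids_py (seq_ids : List Int) : List Int :=
  match seq_ids.head? with
  | none => []  -- the first-element access raises IndexError: excluded by Pre_
  | some id0 =>
    -- i is unbound before the loop in Python; the loop always runs on Pre_ inputs,
    -- so the initial 0 is never observed
    let st := (PySem.List.enumerate seq_ids 0).foldl pvStepA (id0, [], 0)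
    st.2.1 ++ [st.2.2]

-- ===== PORT B =====
-- inner while: advance j past the run of elements equal to v
def pvScanRun (seq : List Int) (v : Int) (j : Nat) : Nat :=
  if h : j < seq.length then
    (if seq[j] = v then pvScanRun seq v (j + 1) else j)
  else j
termination_by seq.length - j

theorem le_pvScanRun (seq : List Int) (v : Int) (j : Nat) : j ≤ pvScanRun seq v j := by
  unfold pvScanRun
  split
  · split
    · exact Nat.le_trans (Nat.le_succ j) (le_pvScanRun seq v (j + 1))
    · exact Nat.le_refl j
  · exact Nat.le_refl j
termination_by seq.length - j

-- outer while over run starts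
def pvAltLoop (seq : List Int) (i : Nat) : List Int :=
  if h : i < seq.length then
    ((pvScanRun seq (seq[i]) (i + 1) : Int) - 1) :: pvAltLoop seq (pvScanRun seq (seq[i]) (i + 1))
  else []
termination_by seq.length - i
decreasing_by
  have := le_pvScanRun seq (seq[i]) (i + 1)
  omega

def get_note_end_chunk_ids_py_alt (seq_ids : List Int) : List Int :=
  pvAltLoop seq_ids 0

-- ===== PRECONDITION & SPEC =====
-- Pre_ excludes only the empty list, on which A raises IndexError at its first-element access
def Pre_get_note_end_chunk_ids_py (seq_ids : List Int) : Prop := seq_ids ≠ []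
instance (seq_ids : List Int) : Decidable (Pre_get_note_end_chunk_ids_py seq_ids) := by
  unfold Pre_get_note_end_chunk_ids_py; infer_instance

def pvWitness_get_note_end_chunk_ids_py : List Int := [3, 3, 5]

def Spec_get_note_end_chunk_ids_py (seq_ids : List Int) (out : List Int) : Prop := out = get_note_end_chunk_ids_py_alt seq_ids
instance (seq_ids : List Int) (out : List Int) : Decidable (Spec_get_note_end_chunk_ids_py seq_ids out) := by unfold Spec_get_note_end_chunk_ids_py; infer_instance

-- ===== CLAIM (what is proved, stated in full; the proofs are below) =====
def Claim_equal_get_note_end_chunk_ids_py : Prop := ∀ (seq_ids : List Int), Dom_get_note_end_chunk_ids_py seq_ids → Pre_get_note_end_chunk_ids_py seq_ids → Spec_get_note_end_chunk_ids_py seq_ids (get_note_end_chunk_ids_py seq_ids)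


-- ===== LEMMAS AND PROOFS =====

-- change points of A's loop, in list form with running index s
def pvGA (id : Int) (s : Int) : List Int → List Int
  | [] => []
  | x :: xs => if x ≠ id then (s - 1) :: pvGA x (s + 1) xs else pvGA id (s + 1) xs

-- A's loop from index k with current id, final append folded in
def pvLoopA (seq : List Int) (id : Int) (k : Nat) : List Int :=
  if k < seq.length then
    (if seq[k]! ≠ id then ((k : Int) - 1) :: pvLoopA seq (seq[k]!) (k + 1)
     else pvLoopA seq id (k + 1))
  else [((seq.length : Int) - 1)]
termination_by seq.length - k
decreasing_by all_goals omega

theorem fold_eq (xs : List Int) (s id : Int) (acc : List Int) (ip : Int) :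
    ((PySem.List.enumerate xs s).foldl pvStepA (id, acc, ip)).2.1 ++
      [((PySem.List.enumerate xs s).foldl pvStepA (id, acc, ip)).2.2] =
    acc ++ pvGA id s xs ++ [if xs.isEmpty then ip else s + xs.length - 1] := by
  induction xs generalizing s id acc ip with
  | nil => simp [PySem.List.enumerate_nil, pvGA]
  | cons x xs ih =>
    simp only [PySem.List.enumerate_cons, List.foldl_cons, pvStepA, pvGA]
    by_cases hx : x = id
    · subst hx
      rw [if_neg (by simp), if_neg (by simp), ih]
      cases xs with
      | nil => simp
      | cons y ys => simp; ring_nf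
    · rw [if_pos hx, if_pos hx, ih]
      cases xs with
      | nil => simp
      | cons y ys => simp; ring_nf

theorem pvScanRun_le (seq : List Int) (v : Int) (j : Nat) (h : j ≤ seq.length) :
    pvScanRun seq v j ≤ seq.length := by
  unfold pvScanRun
  split
  · split
    · exact pvScanRun_le seq v (j + 1) (by omega)
    · exact h
  · exact h
termination_by seq.length - j

theorem pvLoopA_scanRun (seq : List Int) (v : Int) (k : Nat) :
    pvLoopA seq v k =
      (if pvScanRun seq v k < seq.length then
        ((pvScanRun seq v k : Int) - 1) :: pvLoopA seq (seq[pvScanRun seq v k]!) (pvScanRun seq v k + 1)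
       else [((seq.length : Int) - 1)]) := by
  by_cases hk : k < seq.length
  · have hsr : pvScanRun seq v k =
        (if seq[k] = v then pvScanRun seq v (k + 1) else k) := by
      rw [pvScanRun, dif_pos hk]
    by_cases he : seq[k] = v
    · have h1 : pvScanRun seq v k = pvScanRun seq v (k + 1) := by rw [hsr, if_pos he]
      have hg : seq[k]! = v := by rw [getElem!_pos seq k hk, he]
      rw [pvLoopA, if_pos hk, if_neg (by simp [hg]), h1]
      exact pvLoopA_scanRun seq v (k + 1)
    · have h1 : pvScanRun seq v k = k := by rw [hsr, if_neg he]
      have hg : seq[k]! ≠ v := by rw [getElem!_pos seq k hk]; exact he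
      rw [pvLoopA, if_pos hk, if_pos hg, h1, if_pos hk]
  · have h1 : pvScanRun seq v k = k := by rw [pvScanRun, dif_neg hk]
    rw [pvLoopA, if_neg hk, h1, if_neg hk]
termination_by seq.length - k

theorem pvAltLoop_eq_loopA (seq : List Int) (i : Nat) (h : i < seq.length) :
    pvAltLoop seq i = pvLoopA seq (seq[i]!) (i + 1) := by
  rw [pvAltLoop, dif_pos h, getElem!_pos seq i h, pvLoopA_scanRun]
  have hle := le_pvScanRun seq (seq[i]) (i + 1)
  have hub := pvScanRun_le seq (seq[i]) (i + 1) (by omega)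
  by_cases hjl : pvScanRun seq (seq[i]) (i + 1) < seq.length
  · rw [if_pos hjl]
    congr 1
    rw [pvAltLoop_eq_loopA seq _ hjl, getElem!_pos seq _ hjl]
  · rw [if_neg hjl]
    have hjn : pvScanRun seq (seq[i]) (i + 1) = seq.length := by omega
    rw [pvAltLoop, dif_neg (by omega)]
    simp [hjn]
termination_by seq.length - i
decreasing_by
  have := le_pvScanRun seq (seq[i]) (i + 1)
  omega

theorem pvLoopA_eq_gA (seq : List Int) (id : Int) (k : Nat) (h : k ≤ seq.length) :
    pvLoopA seq id k = pvGA id (k : Int) (seq.drop k) ++ [((seq.length : Int) - 1)] := by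
  by_cases hk : k < seq.length
  · have hd : seq.drop k = seq[k] :: seq.drop (k + 1) := List.drop_eq_getElem_cons hk
    have hg : seq[k]! = seq[k] := getElem!_pos seq k hk
    rw [pvLoopA, if_pos hk, hd]
    simp only [pvGA, hg]
    by_cases he : seq[k] ≠ id
    · rw [if_pos he, if_pos he, pvLoopA_eq_gA seq (seq[k]) (k + 1) (by omega)]
      push_cast; simp
    · rw [if_neg he, if_neg he, pvLoopA_eq_gA seq id (k + 1) (by omega)]
      push_cast; simp
  · have hkn : seq.length = k := by omega
    have hd : seq.drop k = [] := by rw [List.drop_eq_nil_iff]; omega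
    rw [pvLoopA, if_neg hk, hd]
    simp [pvGA]
termination_by seq.length - k

-- ===== VERDICT (by name: the statement is the Claim_ definition above) =====
theorem get_note_end_chunk_ids_py_spec : Claim_equal_get_note_end_chunk_ids_py := by
  intro seq_ids _ hpre
  unfold Spec_get_note_end_chunk_ids_py
  match seq_ids with
  | [] => exact absurd rfl hpre
  | a :: rest =>
    show get_note_end_chunk_ids_py (a :: rest) = get_note_end_chunk_ids_py_alt (a :: rest)
    have hA : get_note_end_chunk_ids_py (a :: rest) =
        pvGA a 0 (a :: rest) ++ [((a :: rest).length : Int) - 1] := by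
      unfold get_note_end_chunk_ids_py
      simp only [List.head?_cons]
      rw [fold_eq (a :: rest) 0 a [] 0]
      simp
    have hB : get_note_end_chunk_ids_py_alt (a :: rest) =
        pvGA a 1 rest ++ [((a :: rest).length : Int) - 1] := by
      unfold get_note_end_chunk_ids_py_alt
      rw [pvAltLoop_eq_loopA (a :: rest) 0 (by simp),
          pvLoopA_eq_gA (a :: rest) _ 1 (by simp)]
      simp
    rw [hA, hB]
    simp [pvGA]
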